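-- pv_equiv track=rewrite | github.com/stefanh-it/adventofcode22 | 3/p2.py | get_overlap
-- ===== SOURCE A (Python) =====
-- def chunks(lst: list, n: int):
--     """Yield even chunks of n."""
--     for i in range(0, len(lst), n):
--         yield lst[i:i+n]
--
-- def get_overlap(games) -> list:
--     """Get char to compare against."""
--     overlaps: list = []
--     overlap: set
--     groups: list = []
--     groups = list(chunks(games, 3))
--     for group in groups:
--         p1, p2, p3 = set(group[0]), set(group[1]), set(group[2])
--         overlap = p1 & p2 & p3
--         overlaps.append(overlap)
--     return overlaps
-- ===== SOURCE B (Python) =====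
-- def get_overlap(games) -> list:
--     """Get char to compare against."""
--     overlaps = []
--     for i in range(0, len(games), 3):
--         a, b, c = games[i:i+3]
--         counts = {}
--         for s in (a, b, c):
--             for ch in set(s):
--                 counts[ch] = counts.get(ch, 0) + 1
--         overlaps.append({ch for ch in counts if counts[ch] == 3})
--     return overlaps
-- ===== Notes on version B (the rewrite author's own statement) =====
-- stated objective: alternative
-- what changed: Replaces the two set-intersection operations per triple with a single frequency dict counting in how many of the three strings each distinct character occurs, then keeps the characters whose count is exactly 3.
import Mathlib
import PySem

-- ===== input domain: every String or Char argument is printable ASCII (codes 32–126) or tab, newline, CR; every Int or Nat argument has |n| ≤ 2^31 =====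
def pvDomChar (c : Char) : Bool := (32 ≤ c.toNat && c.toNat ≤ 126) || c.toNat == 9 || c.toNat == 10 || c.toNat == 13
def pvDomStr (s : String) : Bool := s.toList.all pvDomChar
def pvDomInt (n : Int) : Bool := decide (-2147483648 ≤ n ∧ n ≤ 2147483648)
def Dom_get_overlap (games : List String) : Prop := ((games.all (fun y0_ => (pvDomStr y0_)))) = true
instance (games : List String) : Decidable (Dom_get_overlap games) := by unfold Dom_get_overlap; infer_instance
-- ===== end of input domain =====

-- B replaces the two per-triple set intersections with one frequency dict over the three strings' distinct characters, keeping the characters counted 3 times (alternative decomposition, same cost).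


-- ===== PORT A =====
-- iterating a Python string yields one-character strings; set(s) is built from them in order
def pvChars (s : String) : List String := s.toList.map String.singleton

-- chunks(games, 3): list of slices games[i:i+3] for i in range(0, len(games), 3)
def pvChunks3 (games : List String) : List (List String) :=
  (PySem.List.pyRange 0 (PySem.List.len games) 3).map
    (fun i => PySem.List.slice games (some i) (some (i + 3)))

def get_overlap (games : List String) : List (List String) :=
  (pvChunks3 games).foldl
    (fun overlaps group =>
      let p1 := PySem.Set.ofList (pvChars (PySem.List.pyGetD group 0 ""))
      let p2 := PySem.Set.ofList (pvChars (PySem.List.pyGetD group 1 ""))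
      let p3 := PySem.Set.ofList (pvChars (PySem.List.pyGetD group 2 ""))
      overlaps ++ [PySem.Set.inter (PySem.Set.inter p1 p2) p3])
    []

-- ===== PORT B =====
def get_overlap_alt (games : List String) : List (List String) :=
  (PySem.List.pyRange 0 (PySem.List.len games) 3).foldl
    (fun overlaps i =>
      match PySem.List.slice games (some i) (some (i + 3)) with
      | [a, b, c] =>
        let counts : PySem.Dict String Int :=
          [a, b, c].foldl
            (fun d s =>
              (PySem.Set.ofList (pvChars s)).foldl
                (fun d ch => d.insert ch (d.getD ch 0 + 1)) d)
            PySem.Dict.empty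
        overlaps ++ [PySem.Set.ofList (counts.keys.filter (fun ch => counts.getD ch 0 == 3))]
      | _ => overlaps)   -- a, b, c = group raises ValueError here; excluded by Pre_
    []

-- ===== PRECONDITION & SPEC =====
-- A raises IndexError (and B ValueError) when the last chunk has fewer than 3 strings
def Pre_get_overlap (games : List String) : Prop := games.length % 3 = 0
instance (games : List String) : Decidable (Pre_get_overlap games) := by unfold Pre_get_overlap; infer_instance
def pvWitness_get_overlap : List String := ["vJrwpWtwJgWr", "jqHRNqRjqzjGDLGL", "PmmdzqPrV"]

def Spec_get_overlap (games : List String) (out : List (List String)) : Prop := out = get_overlap_alt games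
instance (games : List String) (out : List (List String)) : Decidable (Spec_get_overlap games out) := by unfold Spec_get_overlap; infer_instance

-- ===== CLAIM (what is proved, stated in full; the proofs are below) =====
def Claim_equal_get_overlap : Prop := ∀ (games : List String), Dom_get_overlap games → Pre_get_overlap games → Spec_get_overlap games (get_overlap games)

-- ===== LEMMAS AND PROOFS =====

-- a nodup list is already a set
lemma pv_foldl_add_of_disjoint {α : Type} [BEq α] [LawfulBEq α] (ys : List α) :
    ∀ (acc : List α), (∀ x ∈ ys, x ∉ acc) → ys.Nodup →
      ys.foldl PySem.Set.add acc = acc ++ ys := by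
  induction ys with
  | nil => intro acc _ _; simp
  | cons y ys ih =>
    intro acc hd hn
    have hy : y ∉ acc := hd y (by simp)
    simp only [List.foldl_cons, PySem.Set.add_of_not_mem hy]
    rw [ih (acc ++ [y]) ?_ (List.nodup_cons.mp hn).2]
    · simp
    · intro x hx
      simp only [List.mem_append, List.mem_singleton]
      rintro (h | rfl)
      · exact hd x (by simp [hx]) h
      · exact (List.nodup_cons.mp hn).1 hx

lemma pv_ofList_of_nodup {α : Type} [BEq α] [LawfulBEq α] (s : List α) (h : s.Nodup) :
    PySem.Set.ofList s = s := by
  have := pv_foldl_add_of_disjoint s ([] : List α) (by simp) h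
  simpa [PySem.Set.ofList, PySem.Set.empty] using this

-- filtering by a predicate implying membership in the seed ignores later additions
lemma pv_filter_foldl_add {α : Type} [BEq α] [LawfulBEq α] (P : α → Bool) (ys : List α) :
    ∀ (s : List α), (∀ x, P x = true → x ∈ s) →
      (ys.foldl PySem.Set.add s).filter P = s.filter P := by
  induction ys with
  | nil => intro s _; rfl
  | cons y ys ih =>
    intro s hs
    simp only [List.foldl_cons]
    by_cases hy : y ∈ s
    · rw [PySem.Set.add_of_mem hy]
      exact ih s hs
    · rw [PySem.Set.add_of_not_mem hy]
      rw [ih (s ++ [y]) (fun x hx => by simp [hs x hx])]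
      have hPy : P y = false := by
        by_contra h
        exact hy (hs y (by simpa using h))
      simp [List.filter_append, hPy]

-- the per-triple equality: counting then filtering count == 3 is the double intersection
lemma pv_group_eq (a b c : String) :
    PySem.Set.ofList
      ((PySem.Dict.keys ([a, b, c].foldl
          (fun d s => (PySem.Set.ofList (pvChars s)).foldl
            (fun d ch => d.insert ch (d.getD ch 0 + 1)) d)
          (PySem.Dict.empty : PySem.Dict String Int))).filter
        (fun ch => PySem.Dict.getD ([a, b, c].foldl
          (fun d s => (PySem.Set.ofList (pvChars s)).foldl
            (fun d ch => d.insert ch (d.getD ch 0 + 1)) d)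
          (PySem.Dict.empty : PySem.Dict String Int)) ch 0 == 3))
    = PySem.Set.inter
        (PySem.Set.inter (PySem.Set.ofList (pvChars a)) (PySem.Set.ofList (pvChars b)))
        (PySem.Set.ofList (pvChars c)) := by
  set sa := PySem.Set.ofList (pvChars a) with hsa
  set sb := PySem.Set.ofList (pvChars b) with hsb
  set sc := PySem.Set.ofList (pvChars c) with hsc
  have hna : sa.Nodup := PySem.Set.nodup_ofList _
  have hnb : sb.Nodup := PySem.Set.nodup_ofList _
  have hnc : sc.Nodup := PySem.Set.nodup_ofList _
  -- the dict is the counter of the concatenation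
  have hdict : [a, b, c].foldl
      (fun d s => (PySem.Set.ofList (pvChars s)).foldl
        (fun d ch => d.insert ch (d.getD ch 0 + 1)) d)
      (PySem.Dict.empty : PySem.Dict String Int) = PySem.Dict.counter (sa ++ sb ++ sc) := by
    rw [← PySem.Dict.foldl_insert_getD_add_one_eq_counter]
    simp [List.foldl_append, hsa, hsb, hsc]
  rw [hdict, PySem.Dict.keys_counter]
  set P : String → Bool := fun ch => (PySem.Dict.counter (sa ++ sb ++ sc)).getD ch 0 == 3 with hP
  -- P implies membership in sa
  have hcount : ∀ ch, P ch = true ↔ (ch ∈ sa ∧ ch ∈ sb ∧ ch ∈ sc) := by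
    intro ch
    have hg : (PySem.Dict.counter (sa ++ sb ++ sc)).getD ch 0 = (List.count ch (sa ++ sb ++ sc) : Int) :=
      PySem.Dict.getD_counter _ _
    have hsplit : List.count ch (sa ++ sb ++ sc)
        = List.count ch sa + List.count ch sb + List.count ch sc := by
      rw [List.count_append, List.count_append]
    have c1 : List.count ch sa = (if ch ∈ sa then 1 else 0) := by
      split
      · exact List.count_eq_one_of_mem hna ‹_›
      · exact List.count_eq_zero_of_not_mem ‹_›
    have c2 : List.count ch sb = (if ch ∈ sb then 1 else 0) := by
      split
      · exact List.count_eq_one_of_mem hnb ‹_›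
      · exact List.count_eq_zero_of_not_mem ‹_›
    have c3 : List.count ch sc = (if ch ∈ sc then 1 else 0) := by
      split
      · exact List.count_eq_one_of_mem hnc ‹_›
      · exact List.count_eq_zero_of_not_mem ‹_›
    rw [hP]
    simp only [hg, hsplit, c1, c2, c3, beq_iff_eq]
    by_cases h1 : ch ∈ sa <;> by_cases h2 : ch ∈ sb <;> by_cases h3 : ch ∈ sc <;>
      simp [h1, h2, h3]
  -- ofList (sa ++ sb ++ sc) = foldl add sa (sb ++ sc)
  have hof : PySem.Set.ofList (sa ++ sb ++ sc) = (sb ++ sc).foldl PySem.Set.add sa := by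
    rw [PySem.Set.ofList_eq_foldl, List.append_assoc, List.foldl_append]
    congr 1
    exact pv_ofList_of_nodup sa hna
  rw [hof, pv_filter_foldl_add P (sb ++ sc) sa (fun x hx => ((hcount x).mp hx).1)]
  -- outer ofList of a nodup list
  rw [pv_ofList_of_nodup _ (List.Nodup.filter _ hna)]
  -- rewrite the intersection as one filter and match predicates on sa
  show sa.filter P = PySem.Set.inter (PySem.Set.inter sa sb) sc
  simp only [PySem.Set.inter, List.filter_filter]
  refine List.filter_congr ?_
  intro x hx
  rw [Bool.eq_iff_iff]
  simp only [Bool.and_eq_true, PySem.Set.contains_iff, hcount x]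
  tauto

-- under Pre_, every chunk index yields a slice of length exactly 3
lemma pv_slice_len3 (games : List String) (h : games.length % 3 = 0)
    (i : Int) (hi : i ∈ PySem.List.pyRange 0 (PySem.List.len games) 3) :
    ∃ a b c, PySem.List.slice games (some i) (some (i + 3)) = [a, b, c] := by
  rw [PySem.List.mem_pyRange_iff_of_pos (by norm_num)] at hi
  obtain ⟨h0, hlt, k, hk⟩ := hi
  simp only [PySem.List.len_eq, sub_zero] at hlt hk
  have h3 : i + 3 ≤ (games.length : Int) := by omega
  rw [PySem.List.slice_toNat games h0 (by omega)]
  have hts : (i + 3).toNat - i.toNat = 3 := by omega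
  rw [hts]
  have hdlen : (games.drop i.toNat).length = games.length - i.toNat := List.length_drop ..
  have h3le : 3 ≤ (games.drop i.toNat).length := by omega
  match hD : games.drop i.toNat with
  | [] => simp [hD] at h3le
  | [x] => simp [hD] at h3le
  | [x, y] => simp [hD] at h3le
  | x :: y :: z :: rest => exact ⟨x, y, z, by simp⟩

-- the two folds agree element by element over the chunk indices
lemma pv_foldl_eq (games : List String) (h : games.length % 3 = 0) :
    ∀ (l : List Int) (acc : List (List String)),
      (∀ i ∈ l, i ∈ PySem.List.pyRange 0 (PySem.List.len games) 3) →
      l.foldl (fun overlaps i =>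
        let group := PySem.List.slice games (some i) (some (i + 3))
        let p1 := PySem.Set.ofList (pvChars (PySem.List.pyGetD group 0 ""))
        let p2 := PySem.Set.ofList (pvChars (PySem.List.pyGetD group 1 ""))
        let p3 := PySem.Set.ofList (pvChars (PySem.List.pyGetD group 2 ""))
        overlaps ++ [PySem.Set.inter (PySem.Set.inter p1 p2) p3]) acc
      = l.foldl (fun overlaps i =>
        match PySem.List.slice games (some i) (some (i + 3)) with
        | [a, b, c] =>
          let counts : PySem.Dict String Int :=
            [a, b, c].foldl
              (fun d s =>
                (PySem.Set.ofList (pvChars s)).foldl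
                  (fun d ch => d.insert ch (d.getD ch 0 + 1)) d)
              PySem.Dict.empty
          overlaps ++ [PySem.Set.ofList (counts.keys.filter (fun ch => counts.getD ch 0 == 3))]
        | _ => overlaps) acc := by
  intro l
  induction l with
  | nil => intro acc _; rfl
  | cons i l ih =>
    intro acc hmem
    obtain ⟨a, b, c, habc⟩ := pv_slice_len3 games h i (hmem i (by simp))
    simp only [List.foldl_cons, habc]
    have g0 : PySem.List.pyGetD ([a, b, c] : List String) (0 : Int) "" = a := rfl
    have g1 : PySem.List.pyGetD ([a, b, c] : List String) (1 : Int) "" = b := rfl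
    have g2 : PySem.List.pyGetD ([a, b, c] : List String) (2 : Int) "" = c := rfl
    rw [g0, g1, g2, ← pv_group_eq a b c]
    exact ih _ (fun j hj => hmem j (by simp [hj]))

-- ===== VERDICT (by name: the statement is the Claim_ definition above) =====
theorem get_overlap_spec : Claim_equal_get_overlap := by
  intro games _ hpre
  unfold Spec_get_overlap get_overlap get_overlap_alt pvChunks3
  rw [List.foldl_map]
  exact pv_foldl_eq games hpre _ [] (fun i hi => hi)
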